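-- pv_equiv track=rewrite | github.com/Nevvyboi/AdventOfCode2024 | Day2~Red-NosedReports/red-NosedReportsPart1.py | figureOutSequence
-- ===== SOURCE A (Python) =====
-- def figureOutSequence(sequence : list[int]) -> bool:
--     # Go through each pair of numbers in the sequence
--     for i in range(1, len(sequence)):
--         # Calculate the difference between the current and previous level
--         diff = sequence[i] - sequence[i - 1]
--         # If the difference is 0, it's not an increase or decrease
--         if diff == 0:
--             return False
--         # If the difference is too large (more than 3) or too small (less than -3)
--         if diff > 3 or diff < -3:
--             return False
--         # Check if the pattern changes between increasing and decreasing
--         if i > 1:  # Make sure there's enough data to check a pattern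
--             prev_diff = sequence[i - 1] - sequence[i - 2]
--             if (diff > 0 and prev_diff < 0) or (diff < 0 and prev_diff > 0):
--                 return False
--     # If no issues found, the sequence is safe
--     return True
-- ===== SOURCE B (Python) =====
-- def figureOutSequence(sequence: list[int]) -> bool:
--     diffs = [b - a for a, b in zip(sequence, sequence[1:])]
--     return all(1 <= d <= 3 for d in diffs) or all(-3 <= d <= -1 for d in diffs)
-- ===== Notes on version B (the rewrite author's own statement) =====
-- stated objective: simpler
-- what changed: B builds the list of consecutive differences once and tests 'all diffs in [1,3]' or 'all diffs in [-3,-1]', replacing A's single indexed pass that compares each diff's sign to the previous diff.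
import Mathlib
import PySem

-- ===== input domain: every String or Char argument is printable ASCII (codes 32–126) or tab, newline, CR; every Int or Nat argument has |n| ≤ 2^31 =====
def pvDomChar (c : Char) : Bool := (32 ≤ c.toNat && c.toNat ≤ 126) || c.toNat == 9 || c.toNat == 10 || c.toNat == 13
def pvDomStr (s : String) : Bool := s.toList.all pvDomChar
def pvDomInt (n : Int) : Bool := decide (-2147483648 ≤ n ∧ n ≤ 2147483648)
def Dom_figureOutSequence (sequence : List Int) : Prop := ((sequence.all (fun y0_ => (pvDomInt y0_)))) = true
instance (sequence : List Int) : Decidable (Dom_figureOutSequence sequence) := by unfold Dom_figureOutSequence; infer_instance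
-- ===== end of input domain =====

-- B replaces A's indexed pass (each diff compared to the previous diff's sign) by
-- 'all consecutive diffs in [1,3] or all in [-3,-1]'; objective: simpler.

-- ===== PORT A =====
-- the 'for i in range(1, len(sequence))' loop with its early returns; all indices
-- (i, i-1, i-2 with i > 1) are in range, so getD 0 never sees its default.
def figureOutSequenceLoop (sequence : List Int) (i : Nat) : Bool :=
  if _h : i < sequence.length then
    let diff := sequence.getD i 0 - sequence.getD (i - 1) 0
    if diff = 0 then false
    else if diff > 3 || diff < -3 then false
    else if i > 1 then
      let prev_diff := sequence.getD (i - 1) 0 - sequence.getD (i - 2) 0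
      if (diff > 0 && prev_diff < 0) || (diff < 0 && prev_diff > 0) then false
      else figureOutSequenceLoop sequence (i + 1)
    else figureOutSequenceLoop sequence (i + 1)
  else true
termination_by sequence.length - i

def figureOutSequence (sequence : List Int) : Bool :=
  figureOutSequenceLoop sequence 1

-- ===== PORT B =====
-- diffs = [b - a for a, b in zip(sequence, sequence[1:])]
def figureOutSequenceDiffs (sequence : List Int) : List Int :=
  (sequence.zip (sequence.drop 1)).map (fun p => p.2 - p.1)

def figureOutSequence_alt (sequence : List Int) : Bool :=
  let diffs := figureOutSequenceDiffs sequence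
  (diffs.all fun d => decide (1 ≤ d) && decide (d ≤ 3)) ||
  (diffs.all fun d => decide (-3 ≤ d) && decide (d ≤ -1))

-- ===== PRECONDITION & SPEC =====
def Spec_figureOutSequence (sequence : List Int) (out : Bool) : Prop := out = figureOutSequence_alt sequence
instance (sequence : List Int) (out : Bool) : Decidable (Spec_figureOutSequence sequence out) := by unfold Spec_figureOutSequence; infer_instance

-- ===== CLAIM (what is proved, stated in full; the proofs are below) =====
def Claim_equal_figureOutSequence : Prop := ∀ (sequence : List Int), Dom_figureOutSequence sequence → Spec_figureOutSequence sequence (figureOutSequence sequence)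

-- ===== LEMMAS AND PROOFS =====

-- abstraction of A's loop body as a chain over the diff list: each diff is nonzero,
-- within ±3, and does not flip sign against the previous diff p
def diffChain (p : Int) : List Int → Bool
  | [] => true
  | x :: xs =>
      if x = 0 then false
      else if x > 3 || x < -3 then false
      else if (x > 0 && p < 0) || (x < 0 && p > 0) then false
      else diffChain x xs

theorem diffChain_pos {p : Int} (hp : 1 ≤ p ∧ p ≤ 3) (xs : List Int) :
    diffChain p xs = xs.all fun d => decide (1 ≤ d) && decide (d ≤ 3) := by
  induction xs generalizing p with
  | nil => rfl
  | cons x xs ih =>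
    by_cases hx : 1 ≤ x ∧ x ≤ 3
    · simp only [diffChain, List.all_cons, ih hx]
      have h1 : ¬ x = 0 := by omega
      have h2 : (x > 3 || x < -3) = false := by simp; omega
      have h3 : ((x > 0 && p < 0) || (x < 0 && p > 0)) = false := by simp; omega
      simp [h1, h2, h3]; omega
    · simp only [diffChain, List.all_cons]
      have : (decide (1 ≤ x) && decide (x ≤ 3)) = false := by simp; omega
      rw [this, Bool.false_and]
      split_ifs with h1 h2 h3 <;> first | rfl | (exfalso; simp at h2 h3; omega)

theorem diffChain_neg {p : Int} (hp : -3 ≤ p ∧ p ≤ -1) (xs : List Int) :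
    diffChain p xs = xs.all fun d => decide (-3 ≤ d) && decide (d ≤ -1) := by
  induction xs generalizing p with
  | nil => rfl
  | cons x xs ih =>
    by_cases hx : -3 ≤ x ∧ x ≤ -1
    · simp only [diffChain, List.all_cons, ih hx]
      have h1 : ¬ x = 0 := by omega
      have h2 : (x > 3 || x < -3) = false := by simp; omega
      have h3 : ((x > 0 && p < 0) || (x < 0 && p > 0)) = false := by simp; omega
      simp [h1, h2, h3]; omega
    · simp only [diffChain, List.all_cons]
      have : (decide (-3 ≤ x) && decide (x ≤ -1)) = false := by simp; omega
      rw [this, Bool.false_and]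
      split_ifs with h1 h2 h3 <;> first | rfl | (exfalso; simp at h2 h3; omega)

theorem diffs_length (s : List Int) :
    (figureOutSequenceDiffs s).length = s.length - 1 := by
  simp [figureOutSequenceDiffs]

theorem diffs_getElem (s : List Int) (j : Nat) (h : j + 1 < s.length) :
    (figureOutSequenceDiffs s)[j]'(by rw [diffs_length]; omega) = s[j+1] - s[j] := by
  simp [figureOutSequenceDiffs]

-- A's loop from index j+2 equals a diffChain over the remaining diffs
theorem loop_eq_chain (s : List Int) (j : Nat) :
    figureOutSequenceLoop s (j+2)
      = diffChain (s.getD (j+1) 0 - s.getD j 0) ((figureOutSequenceDiffs s).drop (j+1)) := by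
  by_cases h : j + 2 < s.length
  · rw [figureOutSequenceLoop]
    have hdl : j + 1 < (figureOutSequenceDiffs s).length := by rw [diffs_length]; omega
    have hdrop : (figureOutSequenceDiffs s).drop (j+1)
        = (figureOutSequenceDiffs s)[j+1] :: (figureOutSequenceDiffs s).drop (j+2) :=
      List.drop_eq_getElem_cons hdl
    have hget : (figureOutSequenceDiffs s)[j+1]'hdl = s.getD (j+2) 0 - s.getD (j+1) 0 := by
      rw [diffs_getElem s (j+1) (by omega),
        List.getD_eq_getElem s 0 h, List.getD_eq_getElem s 0 (by omega : j + 1 < s.length)]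
    have hrec := loop_eq_chain s (j+1)
    rw [hdrop, hget]
    simp only [diffChain]
    simp only [show j + 1 + 2 = j + 1 + 1 + 1 from rfl] at hrec
    simp only [dif_pos h, show j + 2 - 1 = j + 1 from rfl, show j + 2 - 2 = j from rfl,
      show j + 1 + 1 = j + 2 from rfl, hrec, show j + 2 > 1 from by omega, if_true]
  · rw [figureOutSequenceLoop]
    have hnil : (figureOutSequenceDiffs s).drop (j+1) = [] := by
      have hle : (figureOutSequenceDiffs s).length ≤ j + 1 := by rw [diffs_length]; omega
      exact List.drop_eq_nil_of_le hle
    simp [h, hnil, diffChain]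
termination_by s.length - j

theorem figureOutSequence_eq_alt (s : List Int) :
    figureOutSequence s = figureOutSequence_alt s := by
  match hs : s with
  | [] => simp [figureOutSequence, figureOutSequenceLoop, figureOutSequence_alt,
      figureOutSequenceDiffs]
  | [a] => simp [figureOutSequence, figureOutSequenceLoop, figureOutSequence_alt,
      figureOutSequenceDiffs]
  | a :: b :: t =>
    have hlen : 1 < (a :: b :: t).length := by simp
    rw [figureOutSequence, figureOutSequenceLoop]
    simp only [dif_pos hlen, show ¬ (1:Nat) > 1 from by omega, if_false]
    have hrec := loop_eq_chain (a :: b :: t) 0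
    have hget1 : (a :: b :: t).getD 1 0 = b := rfl
    have hget0 : (a :: b :: t).getD 0 0 = a := rfl
    simp only [hget1, hget0] at hrec ⊢
    have hdiffs : figureOutSequenceDiffs (a :: b :: t) = (b - a) :: figureOutSequenceDiffs (b :: t) := by
      simp [figureOutSequenceDiffs]
    rw [hrec]
    simp only [hdiffs, List.drop_succ_cons, List.drop_zero]
    by_cases hpos : 1 ≤ b - a ∧ b - a ≤ 3
    · rw [diffChain_pos hpos]
      have h1 : ¬ b - a = 0 := by omega
      have h2 : (b - a > 3 || b - a < -3) = false := by simp; omega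
      have hneg : (decide (-3 ≤ b - a) && decide (b - a ≤ -1)) = false := by simp; omega
      simp only [figureOutSequence_alt, hdiffs, List.all_cons, hneg, Bool.false_and,
        Bool.or_false]
      have hp : (decide (1 ≤ b - a) && decide (b - a ≤ 3)) = true := by simp; omega
      simp [h1, h2]
      exact fun _ => ⟨by omega, by omega⟩
    · by_cases hneg : -3 ≤ b - a ∧ b - a ≤ -1
      · rw [diffChain_neg hneg]
        have h1 : ¬ b - a = 0 := by omega
        have h2 : (b - a > 3 || b - a < -3) = false := by simp; omega
        have hpos' : (decide (1 ≤ b - a) && decide (b - a ≤ 3)) = false := by simp; omega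
        simp only [figureOutSequence_alt, hdiffs, List.all_cons, hpos', Bool.false_and,
          Bool.false_or]
        have hn : (decide (-3 ≤ b - a) && decide (b - a ≤ -1)) = true := by simp; omega
        simp [h1, h2]
        exact fun _ => ⟨by omega, by omega⟩
      · -- first diff is 0 or out of range: both sides false
        simp only [figureOutSequence_alt, hdiffs]
        have hp : (decide (1 ≤ b - a) && decide (b - a ≤ 3)) = false := by simp; omega
        have hn : (decide (-3 ≤ b - a) && decide (b - a ≤ -1)) = false := by simp; omega
        simp only [List.all_cons, hp, hn, Bool.false_and, Bool.or_self]
        split_ifs with h1 h2 <;> first | rfl | (exfalso; simp at h2; omega)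

-- ===== VERDICT (by name: the statement is the Claim_ definition above) =====
theorem figureOutSequence_spec : Claim_equal_figureOutSequence := by
  intro s _
  unfold Spec_figureOutSequence
  exact figureOutSequence_eq_alt s
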